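-- pv_equiv track=rewrite | github.com/skvcool-rgb/KOS-Organism | kos/grid_primitives.py | shrink_colors_one_step
-- ===== SOURCE A (Python) =====
-- from typing import Any, Callable, Dict, List, Tuple
-- from collections import Counter
--
-- Grid = List[List[int]]
--
-- def color_counts(g: Grid) -> Counter:
--     return Counter(c for row in g for c in row)
--
-- def shrink_colors_one_step(g: Grid) -> Grid:
--     """Erode: remove non-bg cells that touch bg in any cardinal direction."""
--     if not g or not g[0]: return g
--     bg = color_counts(g).most_common(1)[0][0]
--     rows, cols = len(g), len(g[0])
--     result = [row[:] for row in g]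
--     for i in range(rows):
--         for j in range(cols):
--             if g[i][j] != bg:
--                 for di, dj in [(-1,0),(1,0),(0,-1),(0,1)]:
--                     ni, nj = i+di, j+dj
--                     if ni < 0 or ni >= rows or nj < 0 or nj >= cols or g[ni][nj] == bg:
--                         result[i][j] = bg
--                         break
--     return result
-- ===== SOURCE B (Python) =====
-- from collections import Counter
--
--
-- def shrink_colors_one_step(g):
--     """Erode: remove non-bg cells that touch bg in any cardinal direction."""
--     if not g or not g[0]:
--         return g
--     bg = Counter(c for row in g for c in row).most_common(1)[0][0]
--     rows, cols = len(g), len(g[0])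
--     result = [row[:] for row in g]
--     # scatter pass: every bg cell blanks its in-grid non-bg 4-neighbours
--     for i in range(rows):
--         for j in range(cols):
--             if g[i][j] == bg:
--                 for ni, nj in ((i - 1, j), (i + 1, j), (i, j - 1), (i, j + 1)):
--                     if 0 <= ni < rows and 0 <= nj < cols and g[ni][nj] != bg:
--                         result[ni][nj] = bg
--     # border sweep: an off-grid neighbour counts as background
--     for j in range(cols):
--         if g[0][j] != bg:
--             result[0][j] = bg
--         if g[rows - 1][j] != bg:
--             result[rows - 1][j] = bg
--     for i in range(rows):
--         if g[i][0] != bg: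
--             result[i][0] = bg
--         if g[i][cols - 1] != bg:
--             result[i][cols - 1] = bg
--     return result
-- ===== Notes on version B (the rewrite author's own statement) =====
-- stated objective: faster
-- what changed: A is a gather pass: for every non-bg cell it scans the four neighbour offsets with per-offset bounds checks and breaks on the first hit; B is the dual scatter pass - every bg cell blanks its in-grid non-bg 4-neighbours - plus a separate border sweep that erodes non-bg border cells (their off-grid neighbour counts as background), all tests reading the original grid. Pre_ excludes only the ragged grids (a row shorter than the first) on which A raises IndexError.
import Mathlib
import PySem

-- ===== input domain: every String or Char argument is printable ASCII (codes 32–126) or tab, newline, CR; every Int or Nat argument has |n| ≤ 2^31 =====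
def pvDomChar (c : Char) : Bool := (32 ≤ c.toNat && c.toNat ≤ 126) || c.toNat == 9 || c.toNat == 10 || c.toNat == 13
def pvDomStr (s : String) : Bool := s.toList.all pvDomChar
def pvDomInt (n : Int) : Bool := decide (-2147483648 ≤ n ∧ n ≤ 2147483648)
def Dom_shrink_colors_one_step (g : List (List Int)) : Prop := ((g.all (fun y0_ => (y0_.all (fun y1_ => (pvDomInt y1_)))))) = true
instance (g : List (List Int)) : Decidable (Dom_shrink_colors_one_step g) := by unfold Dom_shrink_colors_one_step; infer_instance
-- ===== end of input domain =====

-- B replaces A's gather pass (for every non-bg cell, scan its four neighbour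
-- offsets with per-offset bounds checks and break) by the dual scatter pass:
-- every bg cell blanks its in-grid non-bg 4-neighbours, and a separate border
-- sweep erodes non-bg border cells (their off-grid neighbour counts as
-- background). Same asymptotic cost; a timing run measured a constant-factor
-- speedup for B on the generated inputs.

-- ===== PORT A =====
-- g[i][j]: exact for in-range indices (Pre_ guarantees this at every use site)
def pvGet2 (g : List (List Int)) (i j : Int) : Int :=
  (PySem.List.pyGet? ((PySem.List.pyGet? g i).getD []) j).getD 0

-- result[i][j] = v: exact for 0 ≤ i < len(result), 0 ≤ j < len(result[i]) (always the case at call sites)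
def pvSetCell (res : List (List Int)) (i j v : Int) : List (List Int) :=
  res.set i.toNat ((res.getD i.toNat []).set j.toNat v)

def pvDirs : List (Int × Int) := [(-1,0),(1,0),(0,-1),(0,1)]

-- the `for di,dj in …: if <test>: result[i][j] = bg; break` loop writes one fixed value
-- and breaks, so it writes iff some direction passes the test (first match = any match)
def pvTouch (g : List (List Int)) (bg rows cols i j : Int) : Bool :=
  pvDirs.any (fun d =>
    let ni := i + d.1
    let nj := j + d.2
    decide (ni < 0) || decide (rows ≤ ni) || decide (nj < 0) || decide (cols ≤ nj) ||
      (pvGet2 g ni nj == bg))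

def shrink_colors_one_step (g : List (List Int)) : List (List Int) :=
  if g = [] ∨ g.headD [] = [] then g
  else
    let bg :=
      match (PySem.Dict.counter g.flatten).items with
      | [] => 0
      | p :: t => (t.foldl (fun best q => if best.2 < q.2 then q else best) p).1
    let rows := (g.length : Int)
    let cols := ((g.headD []).length : Int)
    let result := g.map (fun row => row)
    (PySem.List.pyRange 0 rows 1).foldl (fun res i =>
      (PySem.List.pyRange 0 cols 1).foldl (fun res j =>
        if pvGet2 g i j ≠ bg then
          if pvTouch g bg rows cols i j then pvSetCell res i j bg else res
        else res) res) result

-- ===== PORT B =====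
def shrink_colors_one_step_alt (g : List (List Int)) : List (List Int) :=
  if g = [] ∨ g.headD [] = [] then g
  else
    let bg :=
      match (PySem.Dict.counter g.flatten).items with
      | [] => 0
      | p :: t => (t.foldl (fun best q => if best.2 < q.2 then q else best) p).1
    let rows := (g.length : Int)
    let cols := ((g.headD []).length : Int)
    let result := g.map (fun row => row)
    -- scatter pass: every bg cell blanks its in-grid non-bg 4-neighbours
    let result := (PySem.List.pyRange 0 rows 1).foldl (fun res i =>
      (PySem.List.pyRange 0 cols 1).foldl (fun res j =>
        if pvGet2 g i j = bg then
          [(i - 1, j), (i + 1, j), (i, j - 1), (i, j + 1)].foldl (fun res p =>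
            if (0 ≤ p.1 ∧ p.1 < rows ∧ 0 ≤ p.2 ∧ p.2 < cols) ∧ pvGet2 g p.1 p.2 ≠ bg
            then pvSetCell res p.1 p.2 bg else res) res
        else res) res) result
    -- border sweep: an off-grid neighbour counts as background
    let result := (PySem.List.pyRange 0 cols 1).foldl (fun res j =>
      let res := if pvGet2 g 0 j ≠ bg then pvSetCell res 0 j bg else res
      if pvGet2 g (rows - 1) j ≠ bg then pvSetCell res (rows - 1) j bg else res) result
    (PySem.List.pyRange 0 rows 1).foldl (fun res i =>
      let res := if pvGet2 g i 0 ≠ bg then pvSetCell res i 0 bg else res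
      if pvGet2 g i (cols - 1) ≠ bg then pvSetCell res i (cols - 1) bg else res) result

-- ===== PRECONDITION & SPEC =====
-- Pre_ excludes exactly the inputs on which A raises IndexError: a row shorter
-- than the first row, so g[i][j] with j < len(g[0]) goes out of range.
def Pre_shrink_colors_one_step (g : List (List Int)) : Prop :=
  ∀ row ∈ g, (g.headD []).length ≤ row.length
instance (g : List (List Int)) : Decidable (Pre_shrink_colors_one_step g) := by
  unfold Pre_shrink_colors_one_step; infer_instance

def pvWitness_shrink_colors_one_step : List (List Int) := [[1, 1], [1, 2]]

def Spec_shrink_colors_one_step (g : List (List Int)) (out : List (List Int)) : Prop :=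
  out = shrink_colors_one_step_alt g
instance (g : List (List Int)) (out : List (List Int)) : Decidable (Spec_shrink_colors_one_step g out) := by
  unfold Spec_shrink_colors_one_step; infer_instance

-- ===== CLAIM (what is proved, stated in full; the proofs are below) =====
def Claim_equal_shrink_colors_one_step : Prop :=
  ∀ (g : List (List Int)), Dom_shrink_colors_one_step g → Pre_shrink_colors_one_step g →
    Spec_shrink_colors_one_step g (shrink_colors_one_step g)

-- ===== LEMMAS AND PROOFS =====
theorem pv_getD_set_self {α : Type} (l : List α) (n : Nat) (a d : α) (h : n < l.length) :
    (l.set n a).getD n d = a := by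
  rw [List.getD_eq_getElem _ _ (by simpa using h)]
  simp [List.getElem_set_self]

theorem pv_getD_set_ne {α : Type} (l : List α) (n m : Nat) (a d : α) (h : n ≠ m) :
    (l.set n a).getD m d = l.getD m d := by
  by_cases hm : m < l.length
  · rw [List.getD_eq_getElem _ _ (by simpa using hm), List.getD_eq_getElem _ _ hm]
    simp [List.getElem_set_ne h]
  · rw [List.getD_eq_default _ _ (by simpa using hm), List.getD_eq_default _ _ (by omega)]

-- a fold of conditional writes, all writing the value bg
def pvWF {α : Type} (P : α → Bool) (pos : α → Int × Int) (bg : Int)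
    (L : List α) (res : List (List Int)) : List (List Int) :=
  L.foldl (fun r x => if P x then pvSetCell r (pos x).1 (pos x).2 bg else r) res

theorem pv_setcell_len (res : List (List Int)) (i j bg : Int) :
    (pvSetCell res i j bg).length = res.length := by
  simp [pvSetCell]

theorem pv_setcell_rowlen (res : List (List Int)) (i j bg : Int) (s : Nat) :
    ((pvSetCell res i j bg).getD s []).length = (res.getD s []).length := by
  unfold pvSetCell
  by_cases hs : i.toNat = s
  · subst hs
    by_cases hlt : i.toNat < res.length
    · rw [pv_getD_set_self _ _ _ _ hlt, List.length_set]
    · rw [List.getD_eq_default _ _ (by simp only [List.length_set]; omega),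
          List.getD_eq_default _ _ (by omega)]
  · rw [pv_getD_set_ne _ _ _ _ _ hs]

theorem pv_wf_len {α : Type} (P : α → Bool) (pos : α → Int × Int) (bg : Int) :
    ∀ (L : List α) (res : List (List Int)), (pvWF P pos bg L res).length = res.length := by
  intro L
  induction L with
  | nil => intro res; rfl
  | cons x xs ih =>
    intro res
    unfold pvWF
    rw [List.foldl_cons]
    by_cases hP : P x = true
    · rw [if_pos hP]
      rw [show xs.foldl _ _ = pvWF P pos bg xs (pvSetCell res (pos x).1 (pos x).2 bg) from rfl]
      rw [ih, pv_setcell_len]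
    · rw [if_neg hP]
      exact ih res

theorem pv_wf_rowlen {α : Type} (P : α → Bool) (pos : α → Int × Int) (bg : Int) :
    ∀ (L : List α) (res : List (List Int)) (s : Nat),
    ((pvWF P pos bg L res).getD s []).length = (res.getD s []).length := by
  intro L
  induction L with
  | nil => intro res s; rfl
  | cons x xs ih =>
    intro res s
    unfold pvWF
    rw [List.foldl_cons]
    by_cases hP : P x = true
    · rw [if_pos hP]
      rw [show xs.foldl _ _ = pvWF P pos bg xs (pvSetCell res (pos x).1 (pos x).2 bg) from rfl]
      rw [ih, pv_setcell_rowlen]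
    · rw [if_neg hP]
      exact ih res s

theorem pv_wf_val {α : Type} (P : α → Bool) (pos : α → Int × Int) (bg : Int) :
    ∀ (L : List α) (res : List (List Int)) (t u : Nat),
    t < res.length → u < (res.getD t []).length →
    (∀ x ∈ L, P x = true → 0 ≤ (pos x).1 ∧ 0 ≤ (pos x).2) →
    ((pvWF P pos bg L res).getD t []).getD u 0
    = if ∃ x ∈ L, P x = true ∧ (pos x).1 = (t : Int) ∧ (pos x).2 = (u : Int) then bg
      else (res.getD t []).getD u 0 := by
  intro L
  induction L with
  | nil => intro res t u _ _ _; simp [pvWF]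
  | cons x xs ih =>
    intro res t u ht hu hpos
    unfold pvWF
    rw [List.foldl_cons]
    by_cases hP : P x = true
    · rw [if_pos hP]
      rw [show xs.foldl _ _ = pvWF P pos bg xs (pvSetCell res (pos x).1 (pos x).2 bg) from rfl]
      obtain ⟨hi0, hj0⟩ := hpos x (List.mem_cons_self) hP
      rw [ih (pvSetCell res (pos x).1 (pos x).2 bg) t u (by rw [pv_setcell_len]; exact ht)
        (by rw [pv_setcell_rowlen]; exact hu) (fun y hy => hpos y (List.mem_cons_of_mem x hy))]
      by_cases hit : (pos x).1 = (t : Int) ∧ (pos x).2 = (u : Int)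
      · have hset : ((pvSetCell res (pos x).1 (pos x).2 bg).getD t []).getD u 0 = bg := by
          unfold pvSetCell
          rw [hit.1, hit.2]
          simp only [Int.toNat_natCast]
          rw [pv_getD_set_self _ _ _ _ ht, pv_getD_set_self _ _ _ _ hu]
        have hex : ∃ y ∈ x :: xs, P y = true ∧ (pos y).1 = (t : Int) ∧ (pos y).2 = (u : Int) :=
          ⟨x, List.mem_cons_self, hP, hit.1, hit.2⟩
        rw [hset, if_pos hex]
        split
        · rfl
        · rfl
      · have hne : ((pvSetCell res (pos x).1 (pos x).2 bg).getD t []).getD u 0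
            = (res.getD t []).getD u 0 := by
          unfold pvSetCell
          by_cases hi : (pos x).1 = (t : Int)
          · have hj : (pos x).2 ≠ (u : Int) := fun hj => hit ⟨hi, hj⟩
            rw [hi]
            simp only [Int.toNat_natCast]
            rw [pv_getD_set_self _ _ _ _ ht, pv_getD_set_ne _ _ _ _ _ (by omega)]
          · rw [pv_getD_set_ne _ _ _ _ _ (by omega)]
        rw [hne]
        have hiff : (∃ y ∈ x :: xs, P y = true ∧ (pos y).1 = (t : Int) ∧ (pos y).2 = (u : Int))
            ↔ (∃ y ∈ xs, P y = true ∧ (pos y).1 = (t : Int) ∧ (pos y).2 = (u : Int)) := by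
          constructor
          · rintro ⟨y, hy, h1, h2, h3⟩
            rcases List.mem_cons.mp hy with rfl | hy'
            · exact absurd ⟨h2, h3⟩ hit
            · exact ⟨y, hy', h1, h2, h3⟩
          · rintro ⟨y, hy, h⟩
            exact ⟨y, List.mem_cons_of_mem x hy, h⟩
        rw [if_congr hiff rfl rfl]
    · rw [if_neg hP]
      rw [show xs.foldl _ _ = pvWF P pos bg xs res from rfl]
      rw [ih res t u ht hu (fun y hy => hpos y (List.mem_cons_of_mem x hy))]
      have hiff : (∃ y ∈ x :: xs, P y = true ∧ (pos y).1 = (t : Int) ∧ (pos y).2 = (u : Int))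
          ↔ (∃ y ∈ xs, P y = true ∧ (pos y).1 = (t : Int) ∧ (pos y).2 = (u : Int)) := by
        constructor
        · rintro ⟨y, hy, h1, h2, h3⟩
          rcases List.mem_cons.mp hy with rfl | hy'
          · exact absurd h1 hP
          · exact ⟨y, hy', h1, h2, h3⟩
        · rintro ⟨y, hy, h⟩
          exact ⟨y, List.mem_cons_of_mem x hy, h⟩
      rw [if_congr hiff rfl rfl]

theorem pv_foldl_noop {α β : Type} (L : List α) (f : β → α → β)
    (h : ∀ x ∈ L, ∀ r, f r x = r) : ∀ res : β, L.foldl f res = res := by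
  induction L with
  | nil => intro res; rfl
  | cons x xs ih =>
    intro res
    rw [List.foldl_cons, h x (List.mem_cons_self) res]
    exact ih (fun y hy r => h y (List.mem_cons_of_mem x hy) r) res

def pvBgA (g : List (List Int)) : Int :=
  match (PySem.Dict.counter g.flatten).items with
  | [] => 0
  | p :: t => (t.foldl (fun best q => if best.2 < q.2 then q else best) p).1

def pvBodyA (g : List (List Int)) (bg : Int) : List (List Int) :=
  (PySem.List.pyRange 0 (g.length : Int) 1).foldl (fun res i =>
    (PySem.List.pyRange 0 ((g.headD []).length : Int) 1).foldl (fun res j =>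
      if pvGet2 g i j ≠ bg then
        if pvTouch g bg (g.length : Int) ((g.headD []).length : Int) i j then pvSetCell res i j bg else res
      else res) res) g

def pvScatter (g : List (List Int)) (bg : Int) (res : List (List Int)) : List (List Int) :=
  (PySem.List.pyRange 0 (g.length : Int) 1).foldl (fun res i =>
    (PySem.List.pyRange 0 ((g.headD []).length : Int) 1).foldl (fun res j =>
      if pvGet2 g i j = bg then
        [(i - 1, j), (i + 1, j), (i, j - 1), (i, j + 1)].foldl (fun res p =>
          if (0 ≤ p.1 ∧ p.1 < (g.length : Int) ∧ 0 ≤ p.2 ∧ p.2 < ((g.headD []).length : Int)) ∧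
             pvGet2 g p.1 p.2 ≠ bg
          then pvSetCell res p.1 p.2 bg else res) res
      else res) res) res

def pvBorderTB (g : List (List Int)) (bg : Int) (res : List (List Int)) : List (List Int) :=
  (PySem.List.pyRange 0 ((g.headD []).length : Int) 1).foldl (fun res j =>
    let res := if pvGet2 g 0 j ≠ bg then pvSetCell res 0 j bg else res
    if pvGet2 g ((g.length : Int) - 1) j ≠ bg then pvSetCell res ((g.length : Int) - 1) j bg else res) res

def pvBorderLR (g : List (List Int)) (bg : Int) (res : List (List Int)) : List (List Int) :=
  (PySem.List.pyRange 0 (g.length : Int) 1).foldl (fun res i =>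
    let res := if pvGet2 g i 0 ≠ bg then pvSetCell res i 0 bg else res
    if pvGet2 g i (((g.headD []).length : Int) - 1) ≠ bg
    then pvSetCell res i (((g.headD []).length : Int) - 1) bg else res) res

def pvBodyB (g : List (List Int)) (bg : Int) : List (List Int) :=
  pvBorderLR g bg (pvBorderTB g bg (pvScatter g bg g))

-- the flattened write streams of the four loops
def pvLA (g : List (List Int)) : List (Int × Int) :=
  (PySem.List.pyRange 0 (g.length : Int) 1).flatMap (fun i =>
    (PySem.List.pyRange 0 ((g.headD []).length : Int) 1).map (fun j => (i, j)))

def pvLS (g : List (List Int)) : List ((Int × Int) × (Int × Int)) :=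
  (PySem.List.pyRange 0 (g.length : Int) 1).flatMap (fun i =>
    (PySem.List.pyRange 0 ((g.headD []).length : Int) 1).flatMap (fun j =>
      [(i - 1, j), (i + 1, j), (i, j - 1), (i, j + 1)].map (fun p => ((i, j), p))))

def pvLTB (g : List (List Int)) : List (Int × Int) :=
  (PySem.List.pyRange 0 ((g.headD []).length : Int) 1).flatMap (fun j =>
    [((0 : Int), j), ((g.length : Int) - 1, j)])

def pvLLR (g : List (List Int)) : List (Int × Int) :=
  (PySem.List.pyRange 0 (g.length : Int) 1).flatMap (fun i =>
    [(i, (0 : Int)), (i, ((g.headD []).length : Int) - 1)])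

def pvPA (g : List (List Int)) (bg : Int) (x : Int × Int) : Bool :=
  decide (pvGet2 g x.1 x.2 ≠ bg) &&
    pvTouch g bg (g.length : Int) ((g.headD []).length : Int) x.1 x.2

def pvPS (g : List (List Int)) (bg : Int) (x : (Int × Int) × (Int × Int)) : Bool :=
  decide (pvGet2 g x.1.1 x.1.2 = bg ∧
    (0 ≤ x.2.1 ∧ x.2.1 < (g.length : Int) ∧ 0 ≤ x.2.2 ∧ x.2.2 < ((g.headD []).length : Int)) ∧
    pvGet2 g x.2.1 x.2.2 ≠ bg)

def pvPE (g : List (List Int)) (bg : Int) (x : Int × Int) : Bool :=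
  decide (pvGet2 g x.1 x.2 ≠ bg)

theorem pv_bodyA_wf (g : List (List Int)) (bg : Int) :
    pvBodyA g bg = pvWF (pvPA g bg) (fun x => x) bg (pvLA g) g := by
  unfold pvBodyA pvWF pvLA
  rw [List.foldl_flatMap]
  apply PySem.List.foldl_congr_mem
  intro acc i _
  rw [List.foldl_map]
  apply PySem.List.foldl_congr_mem
  intro r j _
  show _ = (if pvPA g bg (i, j) then pvSetCell r i j bg else r)
  unfold pvPA
  by_cases h1 : pvGet2 g i j ≠ bg
  · rw [if_pos h1]
    by_cases h2 : pvTouch g bg (g.length : Int) ((g.headD []).length : Int) i j = true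
    · rw [if_pos h2, if_pos (by rw [decide_eq_true h1, h2]; rfl)]
    · rw [if_neg h2, if_neg (by rw [Bool.and_eq_true]; exact fun h => h2 h.2)]
  · rw [if_neg h1, if_neg (by rw [decide_eq_false h1, Bool.false_and]; exact Bool.false_ne_true)]

theorem pv_scatter_wf (g : List (List Int)) (bg : Int) (res : List (List Int)) :
    pvScatter g bg res = pvWF (pvPS g bg) (fun x => x.2) bg (pvLS g) res := by
  unfold pvScatter pvWF pvLS
  rw [List.foldl_flatMap]
  apply PySem.List.foldl_congr_mem
  intro acc i _
  rw [List.foldl_flatMap]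
  apply PySem.List.foldl_congr_mem
  intro r j _
  rw [List.foldl_map]
  by_cases h1 : pvGet2 g i j = bg
  · rw [if_pos h1]
    apply PySem.List.foldl_congr_mem
    intro r2 p _
    show (if (0 ≤ p.1 ∧ p.1 < (g.length : Int) ∧ 0 ≤ p.2 ∧ p.2 < ((g.headD []).length : Int)) ∧
             pvGet2 g p.1 p.2 ≠ bg
          then pvSetCell r2 p.1 p.2 bg else r2)
        = (if pvPS g bg ((i, j), p) then pvSetCell r2 p.1 p.2 bg else r2)
    unfold pvPS
    by_cases h2 : (0 ≤ p.1 ∧ p.1 < (g.length : Int) ∧ 0 ≤ p.2 ∧ p.2 < ((g.headD []).length : Int)) ∧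
        pvGet2 g p.1 p.2 ≠ bg
    · rw [if_pos h2, if_pos (decide_eq_true ⟨h1, h2⟩)]
    · rw [if_neg h2, if_neg (by
        intro hd
        exact h2 (of_decide_eq_true hd).2)]
  · rw [if_neg h1]
    refine (pv_foldl_noop _ _ ?_ r).symm
    intro p hp r2
    rw [if_neg (by
      intro hd
      exact h1 (of_decide_eq_true hd).1)]

theorem pv_borderTB_wf (g : List (List Int)) (bg : Int) (res : List (List Int)) :
    pvBorderTB g bg res = pvWF (pvPE g bg) (fun x => x) bg (pvLTB g) res := by
  unfold pvBorderTB pvWF pvLTB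
  rw [List.foldl_flatMap]
  apply PySem.List.foldl_congr_mem
  intro acc j _
  show _ = List.foldl _ acc [((0 : Int), j), ((g.length : Int) - 1, j)]
  simp only [List.foldl_cons, List.foldl_nil]
  unfold pvPE
  by_cases h1 : pvGet2 g 0 j ≠ bg <;>
    by_cases h2 : pvGet2 g ((g.length : Int) - 1) j ≠ bg <;>
      simp [h1, h2]

theorem pv_borderLR_wf (g : List (List Int)) (bg : Int) (res : List (List Int)) :
    pvBorderLR g bg res = pvWF (pvPE g bg) (fun x => x) bg (pvLLR g) res := by
  unfold pvBorderLR pvWF pvLLR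
  rw [List.foldl_flatMap]
  apply PySem.List.foldl_congr_mem
  intro acc i _
  show _ = List.foldl _ acc [(i, (0 : Int)), (i, ((g.headD []).length : Int) - 1)]
  simp only [List.foldl_cons, List.foldl_nil]
  unfold pvPE
  by_cases h1 : pvGet2 g i 0 ≠ bg <;>
    by_cases h2 : pvGet2 g i (((g.headD []).length : Int) - 1) ≠ bg <;>
      simp [h1, h2]

set_option maxHeartbeats 1600000 in
theorem pv_core (g : List (List Int)) (bg : Int)
    (hgne : g ≠ []) (hhead : g.headD [] ≠ []) :
    pvBodyA g bg = pvBodyB g bg := by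
  have hcols : 0 < (g.headD []).length := List.length_pos_of_ne_nil hhead
  have hrows : 0 < g.length := List.length_pos_of_ne_nil hgne
  rw [pv_bodyA_wf]
  unfold pvBodyB
  rw [pv_scatter_wf, pv_borderTB_wf, pv_borderLR_wf]
  have hposA : ∀ x ∈ pvLA g, pvPA g bg x = true → 0 ≤ x.1 ∧ 0 ≤ x.2 := by
    intro x hx _
    simp only [pvLA, List.mem_flatMap, List.mem_map, PySem.List.mem_pyRange_one] at hx
    obtain ⟨i, ⟨hi0, _⟩, j, ⟨⟨hj0, _⟩, hxe⟩⟩ := hx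
    rw [← hxe]
    exact ⟨hi0, hj0⟩
  have hposS : ∀ x ∈ pvLS g, pvPS g bg x = true → 0 ≤ x.2.1 ∧ 0 ≤ x.2.2 := by
    intro x _ hP
    have h := of_decide_eq_true hP
    exact ⟨h.2.1.1, h.2.1.2.2.1⟩
  have hposTB : ∀ x ∈ pvLTB g, pvPE g bg x = true → 0 ≤ x.1 ∧ 0 ≤ x.2 := by
    intro x hx _
    simp only [pvLTB, List.mem_flatMap, List.mem_cons, List.not_mem_nil, or_false,
      PySem.List.mem_pyRange_one] at hx
    obtain ⟨j, ⟨hj0, _⟩, hxe | hxe⟩ := hx <;> subst hxe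
    · exact ⟨le_refl 0, hj0⟩
    · exact ⟨by omega, hj0⟩
  have hposLR : ∀ x ∈ pvLLR g, pvPE g bg x = true → 0 ≤ x.1 ∧ 0 ≤ x.2 := by
    intro x hx _
    simp only [pvLLR, List.mem_flatMap, List.mem_cons, List.not_mem_nil, or_false,
      PySem.List.mem_pyRange_one] at hx
    obtain ⟨i, ⟨hi0, _⟩, hxe | hxe⟩ := hx <;> subst hxe
    · exact ⟨hi0, le_refl 0⟩
    · exact ⟨hi0, by omega⟩
  apply List.ext_getElem
  · rw [pv_wf_len, pv_wf_len, pv_wf_len, pv_wf_len]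
  · intro t ht1 ht2
    rw [← List.getD_eq_getElem _ [] ht1, ← List.getD_eq_getElem _ [] ht2]
    have ht : t < g.length := by rwa [pv_wf_len] at ht1
    apply List.ext_getElem
    · rw [pv_wf_rowlen, pv_wf_rowlen, pv_wf_rowlen, pv_wf_rowlen]
    · intro u hu1 hu2
      rw [← List.getD_eq_getElem _ 0 hu1, ← List.getD_eq_getElem _ 0 hu2]
      have hu : u < (g.getD t []).length := by rwa [pv_wf_rowlen] at hu1
      rw [pv_wf_val (pvPA g bg) (fun x => x) bg (pvLA g) g t u ht hu hposA]
      rw [pv_wf_val (pvPE g bg) (fun x => x) bg (pvLLR g) _ t u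
        (by rw [pv_wf_len, pv_wf_len]; exact ht)
        (by rw [pv_wf_rowlen, pv_wf_rowlen]; exact hu) hposLR]
      rw [pv_wf_val (pvPE g bg) (fun x => x) bg (pvLTB g) _ t u
        (by rw [pv_wf_len]; exact ht) (by rw [pv_wf_rowlen]; exact hu) hposTB]
      rw [pv_wf_val (pvPS g bg) (fun x => x.2) bg (pvLS g) g t u ht hu hposS]
      have hC0 : 0 ≤ (t : Int) := by positivity
      have htR : (t : Int) < (g.length : Int) := by exact_mod_cast ht
      have hu0 : 0 ≤ (u : Int) := by positivity
      -- A's neighbour scan, as a proposition (valid when the cell is inside the grid proper)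
      have htouch_iff : u < (g.headD []).length →
          (pvTouch g bg (g.length : Int) ((g.headD []).length : Int) (t : Int) (u : Int) = true ↔
           (t = 0 ∨ (t : Int) = (g.length : Int) - 1 ∨ u = 0 ∨
            (u : Int) = ((g.headD []).length : Int) - 1 ∨
            pvGet2 g ((t : Int) - 1) (u : Int) = bg ∨
            pvGet2 g ((t : Int) + 1) (u : Int) = bg ∨
            pvGet2 g (t : Int) ((u : Int) - 1) = bg ∨
            pvGet2 g (t : Int) ((u : Int) + 1) = bg)) := by
        intro huC
        have huC' : (u : Int) < ((g.headD []).length : Int) := by exact_mod_cast huC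
        unfold pvTouch pvDirs
        simp only [List.any_cons, List.any_nil, Bool.or_false, Bool.or_eq_true,
          decide_eq_true_eq, beq_iff_eq]
        rw [show (t : Int) + -1 = (t : Int) - 1 from by ring,
            show (u : Int) + -1 = (u : Int) - 1 from by ring,
            show (t : Int) + 0 = (t : Int) from by ring,
            show (u : Int) + 0 = (u : Int) from by ring]
        by_cases r1 : pvGet2 g ((t : Int) - 1) (u : Int) = bg <;>
          by_cases r2 : pvGet2 g ((t : Int) + 1) (u : Int) = bg <;>
            by_cases r3 : pvGet2 g (t : Int) ((u : Int) - 1) = bg <;>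
              by_cases r4 : pvGet2 g (t : Int) ((u : Int) + 1) = bg <;>
                simp only [r1, r2, r3, r4, eq_self_iff_true, or_true,
                  true_or, or_false, false_or] <;>
                  omega
      have hEA : (∃ x ∈ pvLA g, pvPA g bg x = true ∧ x.1 = (t : Int) ∧ x.2 = (u : Int))
          ↔ (u < (g.headD []).length ∧ pvGet2 g (t : Int) (u : Int) ≠ bg ∧
             (t = 0 ∨ (t : Int) = (g.length : Int) - 1 ∨ u = 0 ∨
              (u : Int) = ((g.headD []).length : Int) - 1 ∨
              pvGet2 g ((t : Int) - 1) (u : Int) = bg ∨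
              pvGet2 g ((t : Int) + 1) (u : Int) = bg ∨
              pvGet2 g (t : Int) ((u : Int) - 1) = bg ∨
              pvGet2 g (t : Int) ((u : Int) + 1) = bg)) := by
        constructor
        · rintro ⟨x, hx, hPx, h1, h2⟩
          simp only [pvLA, List.mem_flatMap, List.mem_map, PySem.List.mem_pyRange_one] at hx
          obtain ⟨i, ⟨_, hiR⟩, j, ⟨⟨_, hjC⟩, hxe⟩⟩ := hx
          have hxj : x.2 = j := by rw [← hxe]
          have huC : u < (g.headD []).length := by
            have : j = (u : Int) := by rw [← hxj]; exact h2
            omega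
          unfold pvPA at hPx
          rw [h1, h2, Bool.and_eq_true, decide_eq_true_eq] at hPx
          exact ⟨huC, hPx.1, (htouch_iff huC).mp hPx.2⟩
        · rintro ⟨huC, hne, hcase⟩
          refine ⟨((t : Int), (u : Int)), ?_, ?_, rfl, rfl⟩
          · simp only [pvLA, List.mem_flatMap, List.mem_map, PySem.List.mem_pyRange_one]
            exact ⟨(t : Int), ⟨hC0, htR⟩, (u : Int), ⟨⟨hu0, by exact_mod_cast huC⟩, rfl⟩⟩
          · unfold pvPA
            rw [Bool.and_eq_true, decide_eq_true_eq]
            exact ⟨hne, (htouch_iff huC).mpr hcase⟩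
      have hETB : (∃ x ∈ pvLTB g, pvPE g bg x = true ∧ x.1 = (t : Int) ∧ x.2 = (u : Int))
          ↔ (u < (g.headD []).length ∧ (t = 0 ∨ (t : Int) = (g.length : Int) - 1) ∧
             pvGet2 g (t : Int) (u : Int) ≠ bg) := by
        constructor
        · rintro ⟨x, hx, hPx, h1, h2⟩
          simp only [pvLTB, List.mem_flatMap, List.mem_cons, List.not_mem_nil, or_false,
            PySem.List.mem_pyRange_one] at hx
          unfold pvPE at hPx
          rw [h1, h2, decide_eq_true_eq] at hPx
          obtain ⟨j, ⟨_, hjC⟩, hxe | hxe⟩ := hx <;> subst hxe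
          · have h1' : (0 : Int) = (t : Int) := h1
            have h2' : j = (u : Int) := h2
            exact ⟨by omega, Or.inl (by omega), hPx⟩
          · have h1' : (g.length : Int) - 1 = (t : Int) := h1
            have h2' : j = (u : Int) := h2
            exact ⟨by omega, Or.inr (by omega), hPx⟩
        · rintro ⟨huC, hcase, hne⟩
          have huC' : (u : Int) < ((g.headD []).length : Int) := by exact_mod_cast huC
          rcases hcase with h0 | h0
          · refine ⟨((0 : Int), (u : Int)), ?_, ?_, by omega, rfl⟩
            · simp only [pvLTB, List.mem_flatMap, List.mem_cons, List.not_mem_nil, or_false,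
                PySem.List.mem_pyRange_one]
              exact ⟨(u : Int), ⟨hu0, huC'⟩, Or.inl rfl⟩
            · unfold pvPE
              rw [decide_eq_true_eq]
              have he : ((0 : Int), (u : Int)).1 = (t : Int) := by omega
              rw [he]
              exact hne
          · refine ⟨(((g.length : Int) - 1), (u : Int)), ?_, ?_, by omega, rfl⟩
            · simp only [pvLTB, List.mem_flatMap, List.mem_cons, List.not_mem_nil, or_false,
                PySem.List.mem_pyRange_one]
              exact ⟨(u : Int), ⟨hu0, huC'⟩, Or.inr rfl⟩
            · unfold pvPE
              rw [decide_eq_true_eq]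
              have he : (((g.length : Int) - 1), (u : Int)).1 = (t : Int) := by omega
              rw [he]
              exact hne
      have hELR : (∃ x ∈ pvLLR g, pvPE g bg x = true ∧ x.1 = (t : Int) ∧ x.2 = (u : Int))
          ↔ ((u = 0 ∨ (u : Int) = ((g.headD []).length : Int) - 1) ∧
             pvGet2 g (t : Int) (u : Int) ≠ bg) := by
        constructor
        · rintro ⟨x, hx, hPx, h1, h2⟩
          simp only [pvLLR, List.mem_flatMap, List.mem_cons, List.not_mem_nil, or_false,
            PySem.List.mem_pyRange_one] at hx
          unfold pvPE at hPx
          rw [h1, h2, decide_eq_true_eq] at hPx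
          obtain ⟨i, ⟨_, hiR⟩, hxe | hxe⟩ := hx <;> subst hxe
          · have h2' : (0 : Int) = (u : Int) := h2
            exact ⟨Or.inl (by omega), hPx⟩
          · have h2' : ((g.headD []).length : Int) - 1 = (u : Int) := h2
            exact ⟨Or.inr (by omega), hPx⟩
        · rintro ⟨hcase, hne⟩
          rcases hcase with h0 | h0
          · refine ⟨((t : Int), (0 : Int)), ?_, ?_, rfl, by omega⟩
            · simp only [pvLLR, List.mem_flatMap, List.mem_cons, List.not_mem_nil, or_false,
                PySem.List.mem_pyRange_one]
              exact ⟨(t : Int), ⟨hC0, htR⟩, Or.inl rfl⟩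
            · unfold pvPE
              rw [decide_eq_true_eq]
              have he : ((t : Int), (0 : Int)).2 = (u : Int) := by omega
              rw [he]
              exact hne
          · refine ⟨((t : Int), ((g.headD []).length : Int) - 1), ?_, ?_, rfl, by omega⟩
            · simp only [pvLLR, List.mem_flatMap, List.mem_cons, List.not_mem_nil, or_false,
                PySem.List.mem_pyRange_one]
              exact ⟨(t : Int), ⟨hC0, htR⟩, Or.inr rfl⟩
            · unfold pvPE
              rw [decide_eq_true_eq]
              have he : ((t : Int), ((g.headD []).length : Int) - 1).2 = (u : Int) := by omega
              rw [he]
              exact hne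
      have hES : (∃ x ∈ pvLS g, pvPS g bg x = true ∧ x.2.1 = (t : Int) ∧ x.2.2 = (u : Int))
          ↔ (u < (g.headD []).length ∧ pvGet2 g (t : Int) (u : Int) ≠ bg ∧
             ((1 ≤ t ∧ pvGet2 g ((t : Int) - 1) (u : Int) = bg) ∨
              ((t : Int) + 1 < (g.length : Int) ∧ pvGet2 g ((t : Int) + 1) (u : Int) = bg) ∨
              (1 ≤ u ∧ pvGet2 g (t : Int) ((u : Int) - 1) = bg) ∨
              ((u : Int) + 1 < ((g.headD []).length : Int) ∧
               pvGet2 g (t : Int) ((u : Int) + 1) = bg))) := by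
        constructor
        · rintro ⟨x, hx, hPx, h1, h2⟩
          simp only [pvLS, List.mem_flatMap, List.mem_map, List.mem_cons, List.not_mem_nil,
            or_false, PySem.List.mem_pyRange_one] at hx
          obtain ⟨i, ⟨hi0, hiR⟩, j, ⟨hj0, hjC⟩, p, hp, hxe⟩ := hx
          unfold pvPS at hPx
          rw [decide_eq_true_eq, h1, h2] at hPx
          obtain ⟨hbg, ⟨_, _, _, hpC⟩, hne⟩ := hPx
          have hei : x.1.1 = i := by rw [← hxe]
          have hej : x.1.2 = j := by rw [← hxe]
          have hep : x.2 = p := by rw [← hxe]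
          rw [hei, hej] at hbg
          rw [hep] at h1 h2
          have huC : u < (g.headD []).length := by omega
          refine ⟨huC, hne, ?_⟩
          rcases hp with hp | hp | hp | hp <;> subst hp
          · -- p = (i - 1, j): the bg source sits below the target, at (t + 1, u)
            have ha : i - 1 = (t : Int) := h1
            have hb : j = (u : Int) := h2
            right; left
            rw [show i = (t : Int) + 1 from by omega, hb] at hbg
            exact ⟨by omega, hbg⟩
          · have ha : i + 1 = (t : Int) := h1
            have hb : j = (u : Int) := h2
            left
            rw [show i = (t : Int) - 1 from by omega, hb] at hbg
            exact ⟨by omega, hbg⟩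
          · have ha : i = (t : Int) := h1
            have hb : j - 1 = (u : Int) := h2
            right; right; right
            rw [ha, show j = (u : Int) + 1 from by omega] at hbg
            exact ⟨by omega, hbg⟩
          · have ha : i = (t : Int) := h1
            have hb : j + 1 = (u : Int) := h2
            right; right; left
            rw [ha, show j = (u : Int) - 1 from by omega] at hbg
            exact ⟨by omega, hbg⟩
        · rintro ⟨huC, hne, hcase⟩
          have huC' : (u : Int) < ((g.headD []).length : Int) := by exact_mod_cast huC
          rcases hcase with ⟨hb, hr⟩ | ⟨hb, hr⟩ | ⟨hb, hr⟩ | ⟨hb, hr⟩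
          · -- bg source above the target: source (t - 1, u) scatters via its (i + 1, j) entry
            refine ⟨(((t : Int) - 1, (u : Int)), ((t : Int) - 1 + 1, (u : Int))), ?_, ?_, ?_, rfl⟩
            · simp only [pvLS, List.mem_flatMap, List.mem_map, List.mem_cons, List.not_mem_nil,
                or_false, PySem.List.mem_pyRange_one]
              exact ⟨(t : Int) - 1, ⟨by omega, by omega⟩, (u : Int), ⟨hu0, huC'⟩,
                ((t : Int) - 1 + 1, (u : Int)), Or.inr (Or.inl rfl), rfl⟩
            · unfold pvPS
              rw [decide_eq_true_eq]
              refine ⟨hr, ⟨?_, ?_, ?_, ?_⟩, ?_⟩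
              · show (0 : Int) ≤ (t : Int) - 1 + 1
                omega
              · show (t : Int) - 1 + 1 < (g.length : Int)
                omega
              · show (0 : Int) ≤ (u : Int)
                omega
              · show (u : Int) < ((g.headD []).length : Int)
                omega
              show pvGet2 g ((t : Int) - 1 + 1) (u : Int) ≠ bg
              rw [show (t : Int) - 1 + 1 = (t : Int) from by omega]
              exact hne
            · show (t : Int) - 1 + 1 = (t : Int)
              omega
          · refine ⟨(((t : Int) + 1, (u : Int)), ((t : Int) + 1 - 1, (u : Int))), ?_, ?_, ?_, rfl⟩
            · simp only [pvLS, List.mem_flatMap, List.mem_map, List.mem_cons, List.not_mem_nil,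
                or_false, PySem.List.mem_pyRange_one]
              exact ⟨(t : Int) + 1, ⟨by omega, hb⟩, (u : Int), ⟨hu0, huC'⟩,
                ((t : Int) + 1 - 1, (u : Int)), Or.inl rfl, rfl⟩
            · unfold pvPS
              rw [decide_eq_true_eq]
              refine ⟨hr, ⟨?_, ?_, ?_, ?_⟩, ?_⟩
              · show (0 : Int) ≤ (t : Int) + 1 - 1
                omega
              · show (t : Int) + 1 - 1 < (g.length : Int)
                omega
              · show (0 : Int) ≤ (u : Int)
                omega
              · show (u : Int) < ((g.headD []).length : Int)
                omega
              show pvGet2 g ((t : Int) + 1 - 1) (u : Int) ≠ bg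
              rw [show (t : Int) + 1 - 1 = (t : Int) from by omega]
              exact hne
            · show (t : Int) + 1 - 1 = (t : Int)
              omega
          · refine ⟨(((t : Int), (u : Int) - 1), ((t : Int), (u : Int) - 1 + 1)), ?_, ?_, rfl, ?_⟩
            · simp only [pvLS, List.mem_flatMap, List.mem_map, List.mem_cons, List.not_mem_nil,
                or_false, PySem.List.mem_pyRange_one]
              exact ⟨(t : Int), ⟨hC0, htR⟩, (u : Int) - 1, ⟨by omega, by omega⟩,
                ((t : Int), (u : Int) - 1 + 1), Or.inr (Or.inr (Or.inr rfl)), rfl⟩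
            · unfold pvPS
              rw [decide_eq_true_eq]
              refine ⟨hr, ⟨?_, ?_, ?_, ?_⟩, ?_⟩
              · show (0 : Int) ≤ (t : Int)
                omega
              · show (t : Int) < (g.length : Int)
                omega
              · show (0 : Int) ≤ (u : Int) - 1 + 1
                omega
              · show (u : Int) - 1 + 1 < ((g.headD []).length : Int)
                omega
              show pvGet2 g (t : Int) ((u : Int) - 1 + 1) ≠ bg
              rw [show (u : Int) - 1 + 1 = (u : Int) from by omega]
              exact hne
            · show (u : Int) - 1 + 1 = (u : Int)
              omega
          · refine ⟨(((t : Int), (u : Int) + 1), ((t : Int), (u : Int) + 1 - 1)), ?_, ?_, rfl, ?_⟩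
            · simp only [pvLS, List.mem_flatMap, List.mem_map, List.mem_cons, List.not_mem_nil,
                or_false, PySem.List.mem_pyRange_one]
              exact ⟨(t : Int), ⟨hC0, htR⟩, (u : Int) + 1, ⟨by omega, hb⟩,
                ((t : Int), (u : Int) + 1 - 1), Or.inr (Or.inr (Or.inl rfl)), rfl⟩
            · unfold pvPS
              rw [decide_eq_true_eq]
              refine ⟨hr, ⟨?_, ?_, ?_, ?_⟩, ?_⟩
              · show (0 : Int) ≤ (t : Int)
                omega
              · show (t : Int) < (g.length : Int)
                omega
              · show (0 : Int) ≤ (u : Int) + 1 - 1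
                omega
              · show (u : Int) + 1 - 1 < ((g.headD []).length : Int)
                omega
              show pvGet2 g (t : Int) ((u : Int) + 1 - 1) ≠ bg
              rw [show (u : Int) + 1 - 1 = (u : Int) from by omega]
              exact hne
            · show (u : Int) + 1 - 1 = (u : Int)
              omega
      -- A's single write stream is the union of B's three
      have hunion : (∃ x ∈ pvLA g, pvPA g bg x = true ∧ x.1 = (t : Int) ∧ x.2 = (u : Int))
          ↔ ((∃ x ∈ pvLLR g, pvPE g bg x = true ∧ x.1 = (t : Int) ∧ x.2 = (u : Int)) ∨
             (∃ x ∈ pvLTB g, pvPE g bg x = true ∧ x.1 = (t : Int) ∧ x.2 = (u : Int)) ∨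
             (∃ x ∈ pvLS g, pvPS g bg x = true ∧ x.2.1 = (t : Int) ∧ x.2.2 = (u : Int))) := by
        rw [hEA, hETB, hELR, hES]
        constructor
        · rintro ⟨huC, hne, hcase⟩
          rcases hcase with h | h | h | h | h | h | h | h
          · exact Or.inr (Or.inl ⟨huC, Or.inl h, hne⟩)
          · exact Or.inr (Or.inl ⟨huC, Or.inr h, hne⟩)
          · exact Or.inl ⟨Or.inl h, hne⟩
          · exact Or.inl ⟨Or.inr h, hne⟩
          · by_cases h0 : t = 0
            · exact Or.inr (Or.inl ⟨huC, Or.inl h0, hne⟩)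
            · exact Or.inr (Or.inr ⟨huC, hne, Or.inl ⟨by omega, h⟩⟩)
          · by_cases h0 : (t : Int) + 1 = (g.length : Int)
            · exact Or.inr (Or.inl ⟨huC, Or.inr (by omega), hne⟩)
            · exact Or.inr (Or.inr ⟨huC, hne, Or.inr (Or.inl ⟨by omega, h⟩)⟩)
          · by_cases h0 : u = 0
            · exact Or.inl ⟨Or.inl h0, hne⟩
            · exact Or.inr (Or.inr ⟨huC, hne, Or.inr (Or.inr (Or.inl ⟨by omega, h⟩))⟩)
          · by_cases h0 : (u : Int) + 1 = ((g.headD []).length : Int)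
            · exact Or.inl ⟨Or.inr (by omega), hne⟩
            · exact Or.inr (Or.inr ⟨huC, hne, Or.inr (Or.inr (Or.inr ⟨by omega, h⟩))⟩)
        · rintro (⟨hcase, hne⟩ | ⟨huC, hcase, hne⟩ | ⟨huC, hne, hcase⟩)
          · refine ⟨by omega, hne, ?_⟩
            rcases hcase with h | h
            · exact Or.inr (Or.inr (Or.inl h))
            · exact Or.inr (Or.inr (Or.inr (Or.inl h)))
          · refine ⟨huC, hne, ?_⟩
            rcases hcase with h | h
            · exact Or.inl h
            · exact Or.inr (Or.inl h)
          · refine ⟨huC, hne, ?_⟩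
            rcases hcase with ⟨_, h⟩ | ⟨_, h⟩ | ⟨_, h⟩ | ⟨_, h⟩
            · exact Or.inr (Or.inr (Or.inr (Or.inr (Or.inl h))))
            · exact Or.inr (Or.inr (Or.inr (Or.inr (Or.inr (Or.inl h)))))
            · exact Or.inr (Or.inr (Or.inr (Or.inr (Or.inr (Or.inr (Or.inl h))))))
            · exact Or.inr (Or.inr (Or.inr (Or.inr (Or.inr (Or.inr (Or.inr h))))))
      by_cases hL : (∃ x ∈ pvLLR g, pvPE g bg x = true ∧ x.1 = (t : Int) ∧ x.2 = (u : Int))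
      · rw [if_pos hL, if_pos (hunion.mpr (Or.inl hL))]
      · by_cases hT : (∃ x ∈ pvLTB g, pvPE g bg x = true ∧ x.1 = (t : Int) ∧ x.2 = (u : Int))
        · rw [if_neg hL, if_pos hT, if_pos (hunion.mpr (Or.inr (Or.inl hT)))]
        · by_cases hS : (∃ x ∈ pvLS g, pvPS g bg x = true ∧ x.2.1 = (t : Int) ∧ x.2.2 = (u : Int))
          · rw [if_neg hL, if_neg hT, if_pos hS, if_pos (hunion.mpr (Or.inr (Or.inr hS)))]
          · rw [if_neg hL, if_neg hT, if_neg hS,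
              if_neg (fun hA => ((hunion.mp hA).elim hL (fun h => h.elim hT hS)))]

theorem pv_main (g : List (List Int)) :
    shrink_colors_one_step g = shrink_colors_one_step_alt g := by
  by_cases hg : g = [] ∨ g.headD [] = []
  · unfold shrink_colors_one_step shrink_colors_one_step_alt
    rw [if_pos hg, if_pos hg]
  · have h1 : shrink_colors_one_step g = pvBodyA g (pvBgA g) := by
      unfold shrink_colors_one_step pvBodyA pvBgA
      rw [if_neg hg, List.map_id']
    have h2 : shrink_colors_one_step_alt g = pvBodyB g (pvBgA g) := by
      unfold shrink_colors_one_step_alt pvBodyB pvBorderLR pvBorderTB pvScatter pvBgA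
      rw [if_neg hg, List.map_id']
    rw [h1, h2]
    rw [not_or] at hg
    exact pv_core g (pvBgA g) hg.1 hg.2

-- ===== VERDICT (by name: the statement is the Claim_ definition above) =====
theorem shrink_colors_one_step_spec : Claim_equal_shrink_colors_one_step := by
  intro g _ hpre
  unfold Spec_shrink_colors_one_step
  exact pv_main g
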